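-- pv_equiv track=rewrite | github.com/Fsab228/Lid-Bot | LidBot/russian/lidbot/bot/utils/filters.py | has_proximity
-- ===== SOURCE A (Python) =====
-- from typing import List, Optional
--
-- def has_proximity(lemmas: List[str], left_set: set, right_set: set, window: int) -> bool:
--     left_idx = [i for i, token in enumerate(lemmas) if token in left_set]
--     if not left_idx:
--         return False
--     right_idx = [i for i, token in enumerate(lemmas) if token in right_set]
--     if not right_idx:
--         return False
--     j = 0
--     for i in left_idx:
--         while j < len(right_idx) and right_idx[j] < i - window:
--             j += 1
--         if j < len(right_idx) and abs(right_idx[j] - i) <= window: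
--             return True
--     return False
-- ===== SOURCE B (Python) =====
-- def has_proximity(lemmas, left_set, right_set, window):
--     last_left = None
--     last_right = None
--     for i, token in enumerate(lemmas):
--         if token in left_set:
--             last_left = i
--             if last_right is not None and i - last_right <= window:
--                 return True
--         if token in right_set:
--             last_right = i
--             if last_left is not None and i - last_left <= window:
--                 return True
--     return False
-- ===== Notes on version B (the rewrite author's own statement) =====
-- stated objective: faster
-- what changed: Replaces A's two full index-list builds plus a two-pointer merge with a single pass over lemmas that keeps only the last left and last right positions and checks the distance to the most recent opposite token at each hit (early exit, no intermediate lists).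
import Mathlib
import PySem

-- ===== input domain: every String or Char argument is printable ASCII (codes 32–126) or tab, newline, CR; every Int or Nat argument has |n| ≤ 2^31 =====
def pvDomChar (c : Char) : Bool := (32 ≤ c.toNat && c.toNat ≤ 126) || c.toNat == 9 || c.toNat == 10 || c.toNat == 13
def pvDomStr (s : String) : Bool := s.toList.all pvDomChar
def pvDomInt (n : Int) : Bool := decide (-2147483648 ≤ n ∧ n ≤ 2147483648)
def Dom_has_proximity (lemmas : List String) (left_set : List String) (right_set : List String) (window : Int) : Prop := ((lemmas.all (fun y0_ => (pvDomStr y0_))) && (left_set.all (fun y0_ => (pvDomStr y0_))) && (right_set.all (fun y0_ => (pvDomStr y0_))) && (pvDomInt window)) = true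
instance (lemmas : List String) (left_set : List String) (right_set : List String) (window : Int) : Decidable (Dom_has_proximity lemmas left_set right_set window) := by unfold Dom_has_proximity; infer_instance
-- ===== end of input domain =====

-- B replaces A's two index-list builds plus two-pointer merge by a single early-exiting pass
-- keeping only the last left / last right positions (measured faster by a constant factor).

-- ===== PORT A =====
-- the inner 'while j < len(right_idx) and right_idx[j] < i - window: j += 1'
def hpAdvance (R : List Int) (bound : Int) (j : Nat) : Nat :=
  if h : j < R.length then
    if R[j] < bound then hpAdvance R bound (j+1) else j
  else j
termination_by R.length - j

-- the 'for i in left_idx' loop with its running pointer j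
def hpLoop (R : List Int) (w : Int) (L : List Int) (j : Nat) : Bool :=
  match L with
  | [] => false
  | i :: rest =>
    let j' := hpAdvance R (i - w) j
    if h : j' < R.length then
      if |R[j'] - i| ≤ w then true else hpLoop R w rest j'
    else hpLoop R w rest j'

def has_proximity (lemmas : List String) (left_set : List String) (right_set : List String) (window : Int) : Bool :=
  let left_idx := ((PySem.List.enumerate lemmas 0).filter (fun p => PySem.Set.contains left_set p.2)).map (fun p => p.1)
  if left_idx.isEmpty then false
  else
    let right_idx := ((PySem.List.enumerate lemmas 0).filter (fun p => PySem.Set.contains right_set p.2)).map (fun p => p.1)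
    if right_idx.isEmpty then false
    else hpLoop right_idx window left_idx 0

-- ===== PORT B =====
-- 'last is not None and i - last <= window'
def nearB (last : Option Int) (i w : Int) : Bool :=
  match last with
  | none => false
  | some x => decide (i - x ≤ w)

-- B's single pass, state = (last_left, last_right)
def altLoop (ls rs : List String) (w : Int) : List (Int × String) → Option Int → Option Int → Bool
  | [], _, _ => false
  | (i, tok) :: rest, ll, lr =>
    let inL := PySem.Set.contains ls tok
    let ll' := if inL then some i else ll
    if inL && nearB lr i w then true
    else
      let inR := PySem.Set.contains rs tok
      let lr' := if inR then some i else lr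
      if inR && nearB ll' i w then true
      else altLoop ls rs w rest ll' lr'

def has_proximity_alt (lemmas : List String) (left_set : List String) (right_set : List String) (window : Int) : Bool :=
  altLoop left_set right_set window (PySem.List.enumerate lemmas 0) none none

-- ===== PRECONDITION & SPEC =====
def Spec_has_proximity (lemmas : List String) (left_set : List String) (right_set : List String) (window : Int) (out : Bool) : Prop := out = has_proximity_alt lemmas left_set right_set window
instance (lemmas : List String) (left_set : List String) (right_set : List String) (window : Int) (out : Bool) : Decidable (Spec_has_proximity lemmas left_set right_set window out) := by unfold Spec_has_proximity; infer_instance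

-- ===== CLAIM (what is proved, stated in full; the proofs are below) =====
def Claim_equal_has_proximity : Prop := ∀ (lemmas : List String) (left_set : List String) (right_set : List String) (window : Int), Dom_has_proximity lemmas left_set right_set window → Spec_has_proximity lemmas left_set right_set window (has_proximity lemmas left_set right_set window)

-- ===== LEMMAS AND PROOFS =====

lemma hpAdvance_ge (R : List Int) (b : Int) (j : Nat) : j ≤ hpAdvance R b j := by
  fun_induction hpAdvance R b j <;> omega

lemma hpAdvance_le (R : List Int) (b : Int) (j : Nat) (h : j ≤ R.length) :
    hpAdvance R b j ≤ R.length := by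
  fun_induction hpAdvance R b j <;> omega

lemma hpAdvance_below (R : List Int) (b : Int) (j k : Nat) (hk : k < R.length)
    (h1 : j ≤ k) (h2 : k < hpAdvance R b j) : R[k] < b := by
  fun_induction hpAdvance R b j with
  | case1 j hj hlt ih =>
    rcases Nat.eq_or_lt_of_le h1 with h | h
    · subst h; exact hlt
    · exact ih h h2
  | case2 j hj hlt => omega
  | case3 j hj => omega

lemma hpAdvance_stop (R : List Int) (b : Int) (j : Nat)
    (h : hpAdvance R b j < R.length) : ¬ R[hpAdvance R b j] < b := by
  fun_induction hpAdvance R b j with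
  | case1 j hj hlt ih => exact ih h
  | case2 j hj hlt => exact hlt
  | case3 j hj => omega

lemma hpLoop_iff (R : List Int) (w : Int) (L : List Int) (j : Nat)
    (hR : R.Pairwise (· < ·)) (hL : L.Pairwise (· < ·)) (hj : j ≤ R.length)
    (hinv : ∀ k, (hk : k < R.length) → k < j → ∀ l ∈ L, R[k] < l - w) :
    hpLoop R w L j = true ↔ ∃ l ∈ L, ∃ k, ∃ (hk : k < R.length), |R[k] - l| ≤ w := by
  induction L generalizing j with
  | nil => simp [hpLoop]
  | cons i rest ih =>
    have hRmono : ∀ a b : Nat, (ha : a < R.length) → (hb : b < R.length) → a ≤ b → R[a] ≤ R[b] := by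
      intro a b ha hb hab
      rcases Nat.eq_or_lt_of_le hab with h | h
      · subst h; exact le_refl _
      · exact le_of_lt ((List.pairwise_iff_getElem.mp hR) a b ha hb h)
    have hadv := hpAdvance_ge R (i - w) j
    have hj'le : hpAdvance R (i - w) j ≤ R.length := hpAdvance_le R (i - w) j hj
    have hbelow : ∀ k, (hk : k < R.length) → k < hpAdvance R (i - w) j → R[k] < i - w := by
      intro k hk hkj'
      by_cases hkj : k < j
      · exact hinv k hk hkj i (List.mem_cons_self)
      · exact hpAdvance_below R (i - w) j k hk (by omega) hkj'
    have hi_lt : ∀ l ∈ rest, i < l := fun l hl => (List.pairwise_cons.mp hL).1 l hl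
    have hinv' : ∀ k, (hk : k < R.length) → k < hpAdvance R (i - w) j → ∀ l ∈ rest, R[k] < l - w := by
      intro k hk hkj' l hl
      have h1 := hbelow k hk hkj'
      have h2 := hi_lt l hl
      omega
    have ihj' := ih (hpAdvance R (i - w) j) ((List.pairwise_cons.mp hL).2) hj'le hinv'
    -- no hit at i in the "else" cases
    have hnohit : (¬ (hpAdvance R (i - w) j < R.length) ∨
        (∃ h : hpAdvance R (i - w) j < R.length, ¬ |R[hpAdvance R (i - w) j] - i| ≤ w)) →
        ¬ ∃ k, ∃ (hk : k < R.length), |R[k] - i| ≤ w := by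
      rintro hcase ⟨k, hk, habs⟩
      have h1 : ¬ k < hpAdvance R (i - w) j := by
        intro hlt
        have := hbelow k hk hlt
        rw [abs_le] at habs; omega
      have hjlt : hpAdvance R (i - w) j < R.length := by omega
      have h2 := hpAdvance_stop R (i - w) j hjlt
      have h3 := hRmono _ _ hjlt hk (by omega)
      rcases hcase with hcase | ⟨_, hcase⟩
      · exact hcase hjlt
      · rw [abs_le] at habs hcase; omega
    rw [hpLoop]
    by_cases hlt : hpAdvance R (i - w) j < R.length
    · by_cases hab : |R[hpAdvance R (i - w) j] - i| ≤ w
      · simp only [hlt, hab, dif_pos, if_pos]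
        constructor
        · intro _; exact ⟨i, List.mem_cons_self, hpAdvance R (i - w) j, hlt, hab⟩
        · intro _; trivial
      · simp only [hlt, hab, dif_pos, if_neg, not_false_iff]
        rw [ihj']
        have hno := hnohit (Or.inr ⟨hlt, hab⟩)
        constructor
        · rintro ⟨l, hl, hw⟩; exact ⟨l, List.mem_cons_of_mem _ hl, hw⟩
        · rintro ⟨l, hl, hw⟩
          rcases List.mem_cons.mp hl with rfl | hl'
          · exact absurd hw hno
          · exact ⟨l, hl', hw⟩
    · simp only [hlt, dif_neg, not_false_iff]
      rw [ihj']
      have hno := hnohit (Or.inl hlt)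
      constructor
      · rintro ⟨l, hl, hw⟩; exact ⟨l, List.mem_cons_of_mem _ hl, hw⟩
      · rintro ⟨l, hl, hw⟩
        rcases List.mem_cons.mp hl with rfl | hl'
        · exact absurd hw hno
        · exact ⟨l, hl', hw⟩

lemma mem_idx_iff (xs : List (Int × String)) (ss : List String) (l : Int) :
    l ∈ (xs.filter (fun p => PySem.Set.contains ss p.2)).map (fun p => p.1) ↔
      ∃ p ∈ xs, PySem.Set.contains ss p.2 = true ∧ p.1 = l := by
  simp [List.mem_map, List.mem_filter, and_assoc]

lemma hasprox_iff (lemmas ls rs : List String) (w : Int) :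
    has_proximity lemmas ls rs w = true ↔
      ∃ p ∈ PySem.List.enumerate lemmas 0, PySem.Set.contains ls p.2 = true ∧
        ∃ q ∈ PySem.List.enumerate lemmas 0, PySem.Set.contains rs q.2 = true ∧ |p.1 - q.1| ≤ w := by
  have hsortE := PySem.List.pairwise_lt_enumerate lemmas (0 : Int)
  simp only [has_proximity]
  set es := PySem.List.enumerate lemmas 0 with hesdef
  set L := (es.filter (fun p => PySem.Set.contains ls p.2)).map (fun p => p.1) with hLdef
  set R := (es.filter (fun p => PySem.Set.contains rs p.2)).map (fun p => p.1) with hRdef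
  have hsortL : L.Pairwise (· < ·) := by
    rw [hLdef, List.pairwise_map]; exact hsortE.filter _
  have hsortR : R.Pairwise (· < ·) := by
    rw [hRdef, List.pairwise_map]; exact hsortE.filter _
  have hmemL : ∀ l, l ∈ L ↔ ∃ p ∈ es, PySem.Set.contains ls p.2 = true ∧ p.1 = l :=
    fun l => mem_idx_iff es ls l
  have hmemR : ∀ r, r ∈ R ↔ ∃ p ∈ es, PySem.Set.contains rs p.2 = true ∧ p.1 = r :=
    fun r => mem_idx_iff es rs r
  by_cases hL0 : L.isEmpty
  · rw [if_pos hL0]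
    simp only [Bool.false_eq_true, false_iff]
    rintro ⟨p, hp, hpl, -⟩
    have : p.1 ∈ L := (hmemL p.1).mpr ⟨p, hp, hpl, rfl⟩
    rw [List.isEmpty_iff] at hL0
    rw [hL0] at this
    simp at this
  · rw [if_neg hL0]
    by_cases hR0 : R.isEmpty
    · rw [if_pos hR0]
      simp only [Bool.false_eq_true, false_iff]
      rintro ⟨-, -, -, q, hq, hqr, -⟩
      have : q.1 ∈ R := (hmemR q.1).mpr ⟨q, hq, hqr, rfl⟩
      rw [List.isEmpty_iff] at hR0
      rw [hR0] at this
      simp at this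
    · rw [if_neg hR0]
      rw [hpLoop_iff R w L 0 hsortR hsortL (Nat.zero_le _) (by omega)]
      constructor
      · rintro ⟨l, hl, k, hk, habs⟩
        obtain ⟨p, hp, hpl, rfl⟩ := (hmemL l).mp hl
        obtain ⟨q, hq, hqr, hql⟩ := (hmemR R[k]).mp (R.getElem_mem hk)
        refine ⟨p, hp, hpl, q, hq, hqr, ?_⟩
        rw [abs_le] at habs ⊢; omega
      · rintro ⟨p, hp, hpl, q, hq, hqr, habs⟩
        have hl : p.1 ∈ L := (hmemL p.1).mpr ⟨p, hp, hpl, rfl⟩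
        have hr : q.1 ∈ R := (hmemR q.1).mpr ⟨q, hq, hqr, rfl⟩
        obtain ⟨k, hk, hkq⟩ := List.mem_iff_getElem.mp hr
        refine ⟨p.1, hl, k, hk, ?_⟩
        rw [hkq]
        rw [abs_le] at habs ⊢; omega

lemma nearB_iff (o : Option Int) (i w : Int) :
    nearB o i w = true ↔ ∃ x, o = some x ∧ i - x ≤ w := by
  cases o <;> simp [nearB]

lemma altLoop_cons (ls rs : List String) (w i : Int) (tok : String)
    (rest : List (Int × String)) (ll lr : Option Int) :
    altLoop ls rs w ((i, tok) :: rest) ll lr =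
      (if PySem.Set.contains ls tok && nearB lr i w then true
       else if PySem.Set.contains rs tok &&
           nearB (if PySem.Set.contains ls tok then some i else ll) i w then true
       else altLoop ls rs w rest
         (if PySem.Set.contains ls tok then some i else ll)
         (if PySem.Set.contains rs tok then some i else lr)) := rfl

lemma altLoop_iff_aux (ls rs : List String) (w : Int) :
    ∀ (es : List (Int × String)), es.Pairwise (fun p q => p.1 < q.1) →
    ∀ (ll lr : Option Int),
      (∀ x, ll = some x → ∀ p ∈ es, x < p.1) →
      (∀ x, lr = some x → ∀ p ∈ es, x < p.1) →
      (altLoop ls rs w es ll lr = true ↔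
        ((∃ p ∈ es, PySem.Set.contains ls p.2 = true ∧
            ((∃ x, lr = some x ∧ p.1 - x ≤ w) ∨
             (∃ q ∈ es, PySem.Set.contains rs q.2 = true ∧ |p.1 - q.1| ≤ w))) ∨
         (∃ q ∈ es, PySem.Set.contains rs q.2 = true ∧ ∃ x, ll = some x ∧ q.1 - x ≤ w))) := by
  intro es
  induction es with
  | nil => intro _ ll lr _ _; simp [altLoop]
  | cons hd rest ih =>
    obtain ⟨i, tok⟩ := hd
    intro hes ll lr hll hlr
    have hpw := List.pairwise_cons.mp hes
    have hi_lt : ∀ p ∈ rest, i < p.1 := hpw.1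
    have hrest : rest.Pairwise (fun p q => p.1 < q.1) := hpw.2
    have hll_i : ∀ x, ll = some x → x < i := fun x hx => hll x hx (i, tok) List.mem_cons_self
    have hlr_i : ∀ x, lr = some x → x < i := fun x hx => hlr x hx (i, tok) List.mem_cons_self
    have hll_r : ∀ x, ll = some x → ∀ p ∈ rest, x < p.1 :=
      fun x hx p hp => hll x hx p (List.mem_cons_of_mem _ hp)
    have hlr_r : ∀ x, lr = some x → ∀ p ∈ rest, x < p.1 :=
      fun x hx p hp => hlr x hx p (List.mem_cons_of_mem _ hp)
    have hsome : ∀ x : Int, some i = some x → ∀ p ∈ rest, x < p.1 := by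
      intro x hx p hp; injection hx with h; subst h; exact hi_lt p hp
    rw [altLoop_cons]
    by_cases hL : PySem.Set.contains ls tok = true
    · by_cases hn1 : nearB lr i w = true
      · rw [if_pos (by simp [hn1, (PySem.Set.contains_iff ls tok).mp hL])]
        obtain ⟨x, hx, hxw⟩ := (nearB_iff lr i w).mp hn1
        exact iff_of_true rfl (Or.inl ⟨(i, tok), List.mem_cons_self, hL, Or.inl ⟨x, hx, hxw⟩⟩)
      · rw [if_neg (by simp [hn1]), if_pos hL]
        by_cases hR : PySem.Set.contains rs tok = true
        · by_cases hn2 : nearB (some i) i w = true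
          · rw [if_pos (by simp [hn2, (PySem.Set.contains_iff rs tok).mp hR])]
            have hw0 : (0 : Int) ≤ w := by simpa [nearB] using hn2
            exact iff_of_true rfl (Or.inl ⟨(i, tok), List.mem_cons_self, hL,
              Or.inr ⟨(i, tok), List.mem_cons_self, hR, by simpa using hw0⟩⟩)
          · have hwneg : w < 0 := by simpa [nearB] using hn2
            rw [if_neg (by simp [hn2]), if_pos hR,
              ih hrest (some i) (some i) hsome hsome]
            constructor
            · rintro (⟨p, hp, hpl, (⟨x, hx, hxw⟩ | ⟨q, hq, hqr, habs⟩)⟩ | ⟨q, hq, hqr, x, hx, hxw⟩)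
              · injection hx with h; subst h
                have := hi_lt p hp; omega
              · have := abs_nonneg (p.1 - q.1); omega
              · injection hx with h; subst h
                have := hi_lt q hq; omega
            · rintro (⟨p, hp, hpl, (⟨x, hx, hxw⟩ | ⟨q, hq, hqr, habs⟩)⟩ | ⟨q, hq, hqr, x, hx, hxw⟩)
              · have := hlr x hx p hp; omega
              · have := abs_nonneg (p.1 - q.1); omega
              · have := hll x hx q hq; omega
        · rw [if_neg (by simp [show tok ∉ rs from fun h => hR ((PySem.Set.contains_iff rs tok).mpr h)]), if_neg hR, ih hrest (some i) lr hsome hlr_r]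
          constructor
          · rintro (⟨p, hp, hpl, (⟨x, hx, hxw⟩ | ⟨q, hq, hqr, habs⟩)⟩ | ⟨q, hq, hqr, x, hx, hxw⟩)
            · exact Or.inl ⟨p, List.mem_cons_of_mem _ hp, hpl, Or.inl ⟨x, hx, hxw⟩⟩
            · exact Or.inl ⟨p, List.mem_cons_of_mem _ hp, hpl,
                Or.inr ⟨q, List.mem_cons_of_mem _ hq, hqr, habs⟩⟩
            · injection hx with h; subst h
              refine Or.inl ⟨(i, tok), List.mem_cons_self, hL,
                Or.inr ⟨q, List.mem_cons_of_mem _ hq, hqr, ?_⟩⟩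
              have := hi_lt q hq; rw [abs_le]; omega
          · rintro (⟨p, hp, hpl, inner⟩ | ⟨q, hq, hqr, x, hx, hxw⟩)
            · rcases List.mem_cons.mp hp with heq | hp'
              · subst heq
                rcases inner with ⟨x, hx, hxw⟩ | ⟨q, hq, hqr, habs⟩
                · exact absurd ((nearB_iff lr i w).mpr ⟨x, hx, hxw⟩) hn1
                · rcases List.mem_cons.mp hq with heq2 | hq'
                  · subst heq2; exact absurd hqr hR
                  · refine Or.inr ⟨q, hq', hqr, i, rfl, ?_⟩
                    have := hi_lt q hq'; rw [abs_le] at habs; omega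
              · rcases inner with ⟨x, hx, hxw⟩ | ⟨q, hq, hqr, habs⟩
                · exact Or.inl ⟨p, hp', hpl, Or.inl ⟨x, hx, hxw⟩⟩
                · rcases List.mem_cons.mp hq with heq2 | hq'
                  · subst heq2; exact absurd hqr hR
                  · exact Or.inl ⟨p, hp', hpl, Or.inr ⟨q, hq', hqr, habs⟩⟩
            · rcases List.mem_cons.mp hq with heq | hq'
              · subst heq; exact absurd hqr hR
              · have hxi := hll_i x hx
                exact Or.inr ⟨q, hq', hqr, i, rfl, by omega⟩
    · rw [if_neg (by simp [show tok ∉ ls from fun h => hL ((PySem.Set.contains_iff ls tok).mpr h)]), if_neg hL]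
      by_cases hR : PySem.Set.contains rs tok = true
      · by_cases hn : nearB ll i w = true
        · rw [if_pos (by simp [hn, (PySem.Set.contains_iff rs tok).mp hR])]
          obtain ⟨x, hx, hxw⟩ := (nearB_iff ll i w).mp hn
          exact iff_of_true rfl (Or.inr ⟨(i, tok), List.mem_cons_self, hR, x, hx, hxw⟩)
        · rw [if_neg (by simp [hn]), if_pos hR, ih hrest ll (some i) hll_r hsome]
          constructor
          · rintro (⟨p, hp, hpl, (⟨x, hx, hxw⟩ | ⟨q, hq, hqr, habs⟩)⟩ | ⟨q, hq, hqr, x, hx, hxw⟩)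
            · injection hx with h; subst h
              refine Or.inl ⟨p, List.mem_cons_of_mem _ hp, hpl,
                Or.inr ⟨(i, tok), List.mem_cons_self, hR, ?_⟩⟩
              have := hi_lt p hp; rw [abs_le]; omega
            · exact Or.inl ⟨p, List.mem_cons_of_mem _ hp, hpl,
                Or.inr ⟨q, List.mem_cons_of_mem _ hq, hqr, habs⟩⟩
            · exact Or.inr ⟨q, List.mem_cons_of_mem _ hq, hqr, x, hx, hxw⟩
          · rintro (⟨p, hp, hpl, inner⟩ | ⟨q, hq, hqr, x, hx, hxw⟩)
            · rcases List.mem_cons.mp hp with heq | hp'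
              · subst heq; exact absurd hpl hL
              · rcases inner with ⟨x, hx, hxw⟩ | ⟨q, hq, hqr, habs⟩
                · have hxi := hlr_i x hx
                  have := hi_lt p hp'
                  exact Or.inl ⟨p, hp', hpl, Or.inl ⟨i, rfl, by omega⟩⟩
                · rcases List.mem_cons.mp hq with heq2 | hq'
                  · refine Or.inl ⟨p, hp', hpl, Or.inl ⟨i, rfl, ?_⟩⟩
                    have h1 : q.1 = i := by rw [heq2]
                    have := hi_lt p hp'
                    rw [abs_le] at habs; omega
                  · exact Or.inl ⟨p, hp', hpl, Or.inr ⟨q, hq', hqr, habs⟩⟩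
            · rcases List.mem_cons.mp hq with heq | hq'
              · have h1 : q.1 = i := by rw [heq]
                exact absurd ((nearB_iff ll i w).mpr ⟨x, hx, by omega⟩) hn
              · exact Or.inr ⟨q, hq', hqr, x, hx, hxw⟩
      · rw [if_neg (by simp [show tok ∉ rs from fun h => hR ((PySem.Set.contains_iff rs tok).mpr h)]), if_neg hR, ih hrest ll lr hll_r hlr_r]
        constructor
        · rintro (⟨p, hp, hpl, (⟨x, hx, hxw⟩ | ⟨q, hq, hqr, habs⟩)⟩ | ⟨q, hq, hqr, x, hx, hxw⟩)
          · exact Or.inl ⟨p, List.mem_cons_of_mem _ hp, hpl, Or.inl ⟨x, hx, hxw⟩⟩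
          · exact Or.inl ⟨p, List.mem_cons_of_mem _ hp, hpl,
              Or.inr ⟨q, List.mem_cons_of_mem _ hq, hqr, habs⟩⟩
          · exact Or.inr ⟨q, List.mem_cons_of_mem _ hq, hqr, x, hx, hxw⟩
        · rintro (⟨p, hp, hpl, inner⟩ | ⟨q, hq, hqr, x, hx, hxw⟩)
          · rcases List.mem_cons.mp hp with heq | hp'
            · subst heq; exact absurd hpl hL
            · rcases inner with ⟨x, hx, hxw⟩ | ⟨q, hq, hqr, habs⟩
              · exact Or.inl ⟨p, hp', hpl, Or.inl ⟨x, hx, hxw⟩⟩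
              · rcases List.mem_cons.mp hq with heq2 | hq'
                · subst heq2; exact absurd hqr hR
                · exact Or.inl ⟨p, hp', hpl, Or.inr ⟨q, hq', hqr, habs⟩⟩
          · rcases List.mem_cons.mp hq with heq | hq'
            · subst heq; exact absurd hqr hR
            · exact Or.inr ⟨q, hq', hqr, x, hx, hxw⟩

lemma altLoop_iff (ls rs : List String) (w : Int) (es : List (Int × String)) (ll lr : Option Int)
    (hes : es.Pairwise (fun p q => p.1 < q.1))
    (hll : ∀ x, ll = some x → ∀ p ∈ es, x < p.1)
    (hlr : ∀ x, lr = some x → ∀ p ∈ es, x < p.1) :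
    altLoop ls rs w es ll lr = true ↔
      ((∃ p ∈ es, PySem.Set.contains ls p.2 = true ∧
          ((∃ x, lr = some x ∧ p.1 - x ≤ w) ∨
           (∃ q ∈ es, PySem.Set.contains rs q.2 = true ∧ |p.1 - q.1| ≤ w))) ∨
       (∃ q ∈ es, PySem.Set.contains rs q.2 = true ∧ ∃ x, ll = some x ∧ q.1 - x ≤ w)) :=
  altLoop_iff_aux ls rs w es hes ll lr hll hlr

lemma hasprox_alt_iff (lemmas ls rs : List String) (w : Int) :
    has_proximity_alt lemmas ls rs w = true ↔
      ∃ p ∈ PySem.List.enumerate lemmas 0, PySem.Set.contains ls p.2 = true ∧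
        ∃ q ∈ PySem.List.enumerate lemmas 0, PySem.Set.contains rs q.2 = true ∧ |p.1 - q.1| ≤ w := by
  rw [has_proximity_alt, altLoop_iff ls rs w _ none none (PySem.List.pairwise_lt_enumerate lemmas 0)
    (by simp) (by simp)]
  simp

-- ===== VERDICT (by name: the statement is the Claim_ definition above) =====
theorem has_proximity_spec : Claim_equal_has_proximity := by
  intro lemmas ls rs w _
  unfold Spec_has_proximity
  rw [Bool.eq_iff_iff]
  rw [hasprox_iff, hasprox_alt_iff]
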